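-- pv_equiv track=rewrite | github.com/sohaamir/sit_online_botex | test/__init__.py | generate_correct_options
-- ===== SOURCE A (Python) =====
-- def generate_correct_options(reversal_points, num_rounds):
--     correct_options = []
--     # Start with B as the correct option
--     correct_option = 'B'
--
--     for round_num in range(1, num_rounds + 1):
--         # Check if we've reached a reversal point
--         if round_num in reversal_points:
--             # Switch the correct option
--             correct_option = 'A' if correct_option == 'B' else 'B'
--
--         # Store the correct option for this round
--         correct_options.append(correct_option)
--
--     return correct_options
-- ===== SOURCE B (Python) =====
-- def generate_correct_options(reversal_points, num_rounds):
--     points = sorted(p for p in set(reversal_points) if 1 <= p <= num_rounds)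
--     out = []
--     option = 'B'
--     prev = 1
--     for p in points:
--         out.extend([option] * (p - prev))
--         option = 'A' if option == 'B' else 'B'
--         prev = p
--     out.extend([option] * (num_rounds - prev + 1))
--     return out
-- ===== Notes on version B (the rewrite author's own statement) =====
-- stated objective: faster
-- what changed: Instead of scanning reversal_points once per round and toggling per-round state, B sorts the de-duplicated in-range reversal points once and emits constant-option runs between consecutive reversal points.
import Mathlib
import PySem

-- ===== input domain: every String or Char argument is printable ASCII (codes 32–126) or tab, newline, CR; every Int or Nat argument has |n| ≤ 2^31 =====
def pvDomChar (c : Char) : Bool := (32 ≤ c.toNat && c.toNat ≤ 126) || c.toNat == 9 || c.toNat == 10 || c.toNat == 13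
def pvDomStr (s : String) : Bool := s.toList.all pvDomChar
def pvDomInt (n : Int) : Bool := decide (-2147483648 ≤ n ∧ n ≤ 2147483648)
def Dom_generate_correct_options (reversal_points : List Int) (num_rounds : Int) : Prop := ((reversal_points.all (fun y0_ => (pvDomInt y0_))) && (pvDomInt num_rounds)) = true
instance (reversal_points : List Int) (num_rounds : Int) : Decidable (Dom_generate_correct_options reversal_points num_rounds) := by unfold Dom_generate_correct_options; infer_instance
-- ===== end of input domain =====

-- B replaces A's per-round membership scan with one sort of the de-duplicated in-range
-- reversal points followed by emitting constant-option runs (objective: faster).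

-- ===== PORT A =====
def generate_correct_options (reversal_points : List Int) (num_rounds : Int) : List String :=
  ((PySem.List.pyRange 1 (num_rounds + 1) 1).foldl
    (fun (st : List String × String) round_num =>
      let correct_option := if reversal_points.contains round_num then
          (if st.2 = "B" then "A" else "B") else st.2
      (st.1 ++ [correct_option], correct_option))
    ([], "B")).1

-- ===== PORT B =====
-- option = 'A' if option == 'B' else 'B'
def flipS (s : String) : String := if s = "B" then "A" else "B"

def generate_correct_options_alt (reversal_points : List Int) (num_rounds : Int) : List String :=
  -- points = sorted(p for p in set(reversal_points) if 1 <= p <= num_rounds)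
  let points := PySem.List.sorted
    (((PySem.Set.ofList reversal_points) : List Int).filter
      (fun p => decide (1 ≤ p) && decide (p ≤ num_rounds))) (fun x => x) false
  -- run-emitting loop over the reversal points
  let st := points.foldl
    (fun (st : List String × String × Int) p =>
      (st.1 ++ List.replicate ((p - st.2.2).toNat) st.2.1, flipS st.2.1, p))
    ([], "B", 1)
  st.1 ++ List.replicate ((num_rounds - st.2.2 + 1).toNat) st.2.1

-- ===== PRECONDITION & SPEC =====
def Spec_generate_correct_options (reversal_points : List Int) (num_rounds : Int) (out : List String) : Prop := out = generate_correct_options_alt reversal_points num_rounds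
instance (reversal_points : List Int) (num_rounds : Int) (out : List String) : Decidable (Spec_generate_correct_options reversal_points num_rounds out) := by unfold Spec_generate_correct_options; infer_instance

-- ===== CLAIM (what is proved, stated in full; the proofs are below) =====
def Claim_equal_generate_correct_options : Prop := ∀ (reversal_points : List Int) (num_rounds : Int), Dom_generate_correct_options reversal_points num_rounds → Spec_generate_correct_options reversal_points num_rounds (generate_correct_options reversal_points num_rounds)

-- ===== LEMMAS AND PROOFS =====

-- the option A holds after processing rounds 1..k
def optA (rp : List Int) : Nat → String
  | 0 => "B"
  | k+1 => if rp.contains ((k : Int)+1) then flipS (optA rp k) else optA rp k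

-- A's fold over rounds 1..m produces the per-round optA values
theorem foldA_eq (rp : List Int) (m : Nat) :
    (PySem.List.pyRange 1 ((m : Int) + 1) 1).foldl
      (fun (st : List String × String) round_num =>
        let correct_option := if rp.contains round_num then
            (if st.2 = "B" then "A" else "B") else st.2
        (st.1 ++ [correct_option], correct_option))
      ([], "B")
    = ((List.range m).map (fun i => optA rp (i+1)), optA rp m) := by
  induction m with
  | zero => rw [PySem.List.pyRange_one_eq_nil (by omega)]; rfl
  | succ m ih =>
    have hsplit : PySem.List.pyRange 1 (((m+1 : Nat) : Int) + 1) 1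
        = PySem.List.pyRange 1 ((m : Int) + 1) 1 ++ [(m : Int) + 1] := by
      have := PySem.List.pyRange_one_succ_right (a := 1) (b := (m : Int) + 1) (by omega)
      push_cast
      exact this
    rw [hsplit, List.foldl_append, ih, List.range_succ, List.map_append]
    simp only [List.foldl_cons, List.foldl_nil, List.map_cons, List.map_nil]
    show (_ ++ [_], _) = (_, _)
    constructor

-- optA is constant across rounds with no reversal point
theorem optA_const (rp : List Int) (a b : Nat) (hab : a ≤ b)
    (h : ∀ j : Nat, a < j → j ≤ b → rp.contains ((j : Int)) = false) :
    optA rp b = optA rp a := by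
  induction b with
  | zero => have : a = 0 := by omega
            rw [this]
  | succ b ih =>
    rcases Nat.eq_or_lt_of_le hab with heq | hlt
    · rw [heq]
    · have hb : rp.contains ((b : Int) + 1) = false := by
        have := h b.succ (by omega) (by omega)
        push_cast at this ⊢
        exact this
      simp only [optA, hb, if_false, Bool.false_eq_true]
      exact ih (by omega) (fun j hj1 hj2 => h j hj1 (by omega))

-- a map over a range all of whose values are c is a replicate
theorem map_pyRange_eq_replicate {f : Int → String} {a b : Int} {c : String}
    (h : ∀ k, a ≤ k → k < b → f k = c) :
    (PySem.List.pyRange a b 1).map f = List.replicate ((b - a).toNat) c := by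
  rw [List.eq_replicate_iff]
  constructor
  · simp [PySem.List.length_pyRange_one]
  · intro x hx
    obtain ⟨k, hk, rfl⟩ := List.mem_map.mp hx
    have hm := PySem.List.mem_pyRange_one.mp hk
    exact h k hm.1 hm.2

-- the run-emitting loop + final run of B equals the per-round optA map
theorem foldB_eq (rp : List Int) (n : Int) (pts : List Int) (acc : List String)
    (cur : String) (prev lo : Int)
    (hlo0 : 0 ≤ lo) (hlop : lo ≤ prev) (hplo : prev ≤ lo + 1)
    (hsort : pts.Pairwise (· < ·))
    (hmem : ∀ p ∈ pts, lo + 1 ≤ p ∧ p ≤ n ∧ rp.contains p = true)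
    (hcomp : ∀ j : Int, lo + 1 ≤ j → j ≤ n → rp.contains j = true → j ∈ pts)
    (hcur : ∀ k : Nat, lo ≤ (k : Int) →
      (∀ j : Nat, lo + 1 ≤ (j : Int) → (j : Int) ≤ (k : Int) → rp.contains ((j : Int)) = false) →
      optA rp k = cur) :
    (pts.foldl
      (fun (st : List String × String × Int) p =>
        (st.1 ++ List.replicate ((p - st.2.2).toNat) st.2.1, flipS st.2.1, p))
      (acc, cur, prev)).1
    ++ List.replicate ((n - (pts.foldl
      (fun (st : List String × String × Int) p =>
        (st.1 ++ List.replicate ((p - st.2.2).toNat) st.2.1, flipS st.2.1, p))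
      (acc, cur, prev)).2.2 + 1).toNat)
      (pts.foldl
      (fun (st : List String × String × Int) p =>
        (st.1 ++ List.replicate ((p - st.2.2).toNat) st.2.1, flipS st.2.1, p))
      (acc, cur, prev)).2.1
    = acc ++ (PySem.List.pyRange prev (n+1) 1).map (fun k => optA rp k.toNat) := by
  induction pts generalizing acc cur prev lo with
  | nil =>
    simp only [List.foldl_nil]
    rw [map_pyRange_eq_replicate (c := cur)]
    · have he : (n + 1 - prev) = (n - prev + 1) := by ring
      rw [he]
    · intro k hk1 hk2
      have hkn : 0 ≤ k := by omega
      have hcast : ((k.toNat : Int)) = k := Int.toNat_of_nonneg hkn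
      have := hcur k.toNat (by omega)
      rw [hcast] at this
      refine this ?_
      intro j hj1 hj2
      by_contra hc
      have hcj : rp.contains ((j : Int)) = true := by
        cases hcc : rp.contains ((j : Int)) with
        | false => exact absurd hcc hc
        | true => rfl
      have := hcomp j hj1 (by omega) hcj
      simp at this
  | cons p pts ih =>
    obtain ⟨hp1, hpn, hpc⟩ := hmem p (List.mem_cons_self)
    have hppos : 1 ≤ p := by omega
    have hpts_gt : ∀ q ∈ pts, p < q := by
      intro q hq
      exact (List.pairwise_cons.mp hsort).1 q hq
    -- the option for rounds ≥ p before the next reversal point is flipS cur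
    have hcur' : ∀ k : Nat, p ≤ (k : Int) →
        (∀ j : Nat, p + 1 ≤ (j : Int) → (j : Int) ≤ (k : Int) → rp.contains ((j : Int)) = false) →
        optA rp k = flipS cur := by
      intro k hk hnone
      have hpcast : ((p.toNat : Int)) = p := Int.toNat_of_nonneg (by omega)
      have h1 : optA rp k = optA rp p.toNat := by
        refine optA_const rp p.toNat k (by omega) ?_
        intro j hj1 hj2
        exact hnone j (by omega) (by omega)
      obtain ⟨m, hm⟩ : ∃ m, p.toNat = m + 1 := ⟨p.toNat - 1, by omega⟩
      have hmp : ((m : Int)) + 1 = p := by omega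
      have h2 : optA rp p.toNat = flipS (optA rp m) := by
        rw [hm]
        simp only [optA, hmp, hpc, if_true]
      have h3 : optA rp m = cur := by
        refine hcur m (by omega) ?_
        intro j hj1 hj2
        by_contra hc
        have hcj : rp.contains ((j : Int)) = true := by
          cases hcc : rp.contains ((j : Int)) with
          | false => exact absurd hcc hc
          | true => rfl
        have hjmem := hcomp j hj1 (by omega) hcj
        rcases List.mem_cons.mp hjmem with rfl | hjin
        · omega
        · have := hpts_gt _ hjin; omega
      rw [h1, h2, h3]
    simp only [List.foldl_cons]
    rw [ih (acc ++ List.replicate ((p - prev).toNat) cur) (flipS cur) p p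
      (by omega) le_rfl (by omega)
      (List.pairwise_cons.mp hsort).2
      (fun q hq => ⟨by have := hpts_gt q hq; omega, (hmem q (List.mem_cons_of_mem _ hq)).2⟩)
      (fun j hj1 hj2 hjc => by
        have := hcomp j (by omega) hj2 hjc
        rcases List.mem_cons.mp this with rfl | h
        · omega
        · exact h)
      hcur']
    rw [PySem.List.pyRange_one_append prev p (n+1) (by omega) (by omega), List.map_append]
    have hseg : (PySem.List.pyRange prev p 1).map (fun k => optA rp k.toNat)
        = List.replicate ((p - prev).toNat) cur := by
      refine map_pyRange_eq_replicate ?_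
      intro k hk1 hk2
      have hcast : ((k.toNat : Int)) = k := Int.toNat_of_nonneg (by omega)
      have := hcur k.toNat (by omega)
      rw [hcast] at this
      refine this ?_
      intro j hj1 hj2
      by_contra hc
      have hcj : rp.contains ((j : Int)) = true := by
        cases hcc : rp.contains ((j : Int)) with
        | false => exact absurd hcc hc
        | true => rfl
      have hjmem := hcomp j hj1 (by omega) hcj
      rcases List.mem_cons.mp hjmem with rfl | h
      · omega
      · have := hpts_gt _ h; omega
    rw [hseg, List.append_assoc]

-- ===== VERDICT (by name: the statement is the Claim_ definition above) =====
theorem generate_correct_options_spec : Claim_equal_generate_correct_options := by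
  intro rp n _
  unfold Spec_generate_correct_options
  simp only [generate_correct_options, generate_correct_options_alt]
  have hrange : PySem.List.pyRange 1 (n + 1) 1 = PySem.List.pyRange 1 ((n.toNat : Int) + 1) 1 := by
    rcases (by omega : 0 ≤ n ∨ n < 0) with h | h
    · rw [Int.toNat_of_nonneg h]
    · rw [PySem.List.pyRange_one_eq_nil (by omega), PySem.List.pyRange_one_eq_nil (by omega)]
  set points := PySem.List.sorted
    (((PySem.Set.ofList rp) : List Int).filter
      (fun p => decide (1 ≤ p) && decide (p ≤ n))) (fun x => x) false with hpts
  have hmemiff : ∀ p : Int, p ∈ points ↔ (p ∈ rp ∧ 1 ≤ p ∧ p ≤ n) := by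
    intro p
    rw [hpts, PySem.List.mem_sorted, List.mem_filter, PySem.Set.mem_ofList]
    simp
  have hnd : points.Nodup := by
    have h1 : ((PySem.Set.ofList rp) : List Int).Nodup := PySem.Set.nodup_ofList rp
    have h2 := h1.filter (fun p => decide (1 ≤ p) && decide (p ≤ n))
    exact ((PySem.List.sorted_perm _ _ _).nodup_iff).mpr h2
  have hle : points.Pairwise (· ≤ ·) := PySem.List.sorted_pairwise _ _
  have hsort : points.Pairwise (· < ·) :=
    (hle.and hnd).imp (fun h => lt_of_le_of_ne h.1 h.2)
  have hcontains : ∀ j : Int, rp.contains j = true ↔ j ∈ rp := by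
    intro j; exact List.contains_iff_mem
  have hB := foldB_eq rp n points [] "B" 1 0 le_rfl (by omega) (by omega) hsort
    (fun p hp => by
      have := (hmemiff p).mp hp
      exact ⟨by omega, this.2.2, (hcontains p).mpr this.1⟩)
    (fun j hj1 hj2 hjc => (hmemiff j).mpr ⟨(hcontains j).mp hjc, by omega, hj2⟩)
    (fun k hk hnone => by
      have h0 := optA_const rp 0 k (Nat.zero_le _)
        (fun j hj1 hj2 => hnone j (by omega) (by omega))
      rw [h0]; rfl)
  rw [hB, hrange, foldA_eq, List.nil_append, PySem.List.pyRange_one, List.map_map]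
  have hlen : (((n.toNat : Int) + 1) - 1).toNat = n.toNat := by omega
  rw [hlen]
  refine List.map_congr_left ?_
  intro i _
  show optA rp (i + 1) = optA rp ((1 : Int) + (i : Int)).toNat
  have : ((1 : Int) + (i : Int)).toNat = i + 1 := by omega
  rw [this]
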